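-- pv_equiv track=rewrite | github.com/alena-zayts/BMSTU_5sem_analysis_of_algorithms | lab7/src/count_cmp.py | segmentate
-- ===== SOURCE A (Python) =====
-- def sort_by_keys(my_dict, reverse=False):
--     sorted_keys = list(my_dict.keys())
--     sorted_keys.sort(reverse=reverse)
--
--     return {k: my_dict[k] for k in sorted_keys}
--
-- def sort_by_values(my_dict, reverse=False):
--     sorted_dict = list(my_dict.items())
--     sorted_dict.sort(key=lambda i: i[1], reverse=reverse)
--
--     return {elem[0]: elem[1] for elem in sorted_dict}
--
-- def segmentate(my_dict):
--     # создаем словарь частотности сегментов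
--     seg_frequency_dict = {letter: 0 for letter in "abcdefghijklmnopqrstuvwxyz"}
--     for key in my_dict.keys():
--         seg_frequency_dict[key[0]] += 1
--
--     # Сортируем по убыванию частотности
--     seg_frequency_dict = sort_by_values(seg_frequency_dict, reverse=True)
--
--     # создаем отсортированный словарь сегментов с отсортированными сегментами
--     new_dict = {letter: dict() for letter in seg_frequency_dict.keys()}
--     for key in my_dict.keys():
--         new_dict[key[0]].update({key: my_dict[key]})
--     for key in new_dict:
--         new_dict[key] = sort_by_keys(new_dict[key])
--
--     return new_dict
-- ===== SOURCE B (Python) =====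
-- def segmentate(my_dict):
--     letters = "abcdefghijklmnopqrstuvwxyz"
--     # one global sort by key: each segment comes out already sorted and contiguous
--     items = sorted(my_dict.items(), key=lambda kv: kv[0])
--     runs = []
--     for k, v in items:
--         if runs and runs[-1][0] == k[0]:
--             runs[-1][1].append((k, v))
--         else:
--             runs.append((k[0], [(k, v)]))
--     segs = dict(runs)
--     order = sorted(letters, key=lambda c: -len(segs.get(c, ())))
--     return {c: dict(segs.get(c, ())) for c in order}
-- ===== Notes on version B (the rewrite author's own statement) =====
-- stated objective: alternative
-- what changed: A counts first letters, sorts the count dict by value, fills per-letter buckets and key-sorts each bucket; B instead sorts all items once globally by key, collects the contiguous equal-first-letter runs in a single scan (each run already key-sorted), and orders the 26 letters by ascending negated run length.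
import Mathlib
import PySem

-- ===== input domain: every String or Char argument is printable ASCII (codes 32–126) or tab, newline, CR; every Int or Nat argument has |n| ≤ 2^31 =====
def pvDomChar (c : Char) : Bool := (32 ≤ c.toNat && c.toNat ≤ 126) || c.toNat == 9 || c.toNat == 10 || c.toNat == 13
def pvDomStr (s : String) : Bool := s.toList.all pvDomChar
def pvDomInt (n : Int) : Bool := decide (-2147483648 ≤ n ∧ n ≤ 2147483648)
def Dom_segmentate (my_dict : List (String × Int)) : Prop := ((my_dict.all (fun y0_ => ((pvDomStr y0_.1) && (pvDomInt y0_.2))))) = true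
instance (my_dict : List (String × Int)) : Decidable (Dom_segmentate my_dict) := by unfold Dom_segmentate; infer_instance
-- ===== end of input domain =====

-- B replaces A's four passes (count, sort counts, bucket-fill, per-bucket sorts) by one global key sort plus a contiguous-run scan; return value only, neither side mutates.

-- the 26 lowercase letters, as the 1-character strings Python's `letter` iteration yields (shared data of both ports)
def pvLetters : List String :=
  ["a","b","c","d","e","f","g","h","i","j","k","l","m",
   "n","o","p","q","r","s","t","u","v","w","x","y","z"]

-- key[0] as a 1-character string; "" encodes the IndexError case (excluded by Pre_)
def pvFirst (s : String) : String :=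
  match PySem.Str.pyGet? s 0 with
  | some c => String.ofList [c]
  | none => ""

-- ===== PORT A =====
def sortByKeys (my_dict : PySem.Dict String Int) (reverse : Bool) : PySem.Dict String Int :=
  let sortedKeys := PySem.List.sorted my_dict.keys (fun k => k) reverse
  sortedKeys.foldl (fun acc k => acc.insert k (my_dict.getD k 0)) PySem.Dict.empty

def sortByValues (my_dict : PySem.Dict String Int) (reverse : Bool) : PySem.Dict String Int :=
  let sortedDict := PySem.List.sorted my_dict.items (fun i => i.2) reverse
  sortedDict.foldl (fun acc elem => acc.insert elem.1 elem.2) PySem.Dict.empty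

def segmentate (my_dict : List (String × Int)) : List (String × List (String × Int)) :=
  let md := PySem.Dict.ofList my_dict
  let seg0 : PySem.Dict String Int := pvLetters.foldl (fun d letter => d.insert letter 0) PySem.Dict.empty
  -- seg_frequency_dict[key[0]] += 1  (KeyError for key[0] outside a–z, IndexError for "" — both excluded by Pre_)
  let seg1 := md.keys.foldl (fun d key => d.modify (pvFirst key) 0 (fun x => x + 1)) seg0
  let seg2 := sortByValues seg1 true
  let new0 : PySem.Dict String (PySem.Dict String Int) :=
    seg2.keys.foldl (fun d letter => d.insert letter PySem.Dict.empty) PySem.Dict.empty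
  let new1 := md.keys.foldl
    (fun d key => d.modify (pvFirst key) PySem.Dict.empty (fun b => b.insert key (md.getD key 0))) new0
  let new2 := new1.keys.foldl (fun d key => d.insert key (sortByKeys (d.getD key PySem.Dict.empty) false)) new1
  new2.items.map (fun p => (p.1, p.2.items))

-- ===== PORT B =====
-- Source B: one global sort of the items by key, a scan that collects maximal runs of equal
-- first letter (appending to the last run or opening a new one), then the 26 letters
-- ordered by ascending -len(run) and each run turned back into a dict.
-- pvRunStep is the body of Source B's run-collecting loop
def pvRunStep (runs : List (String × List (String × Int))) (p : String × Int) :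
    List (String × List (String × Int)) :=
  match runs.getLast? with
  | some last =>
      if last.1 == pvFirst p.1 then runs.dropLast ++ [(last.1, last.2 ++ [p])]
      else runs ++ [(pvFirst p.1, [p])]
  | none => [(pvFirst p.1, [p])]

def segmentate_alt (my_dict : List (String × Int)) : List (String × List (String × Int)) :=
  let md := PySem.Dict.ofList my_dict
  let items := PySem.List.sorted md.items (fun kv => kv.1) false
  let runs := items.foldl pvRunStep []
  let segs : PySem.Dict String (List (String × Int)) := PySem.Dict.ofList runs
  let order := PySem.List.sorted pvLetters (fun c => -((segs.getD c []).length : Int)) false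
  order.map (fun c => (c, (PySem.Dict.ofList (segs.getD c [])).items))

-- ===== PRECONDITION & SPEC =====
-- Pre_ excludes exactly the inputs on which A raises: a key "" (IndexError on key[0]) or a key whose
-- first character is not one of the 26 lowercase letters (KeyError in the frequency dict).
def Pre_segmentate (my_dict : List (String × Int)) : Prop :=
  (my_dict.all (fun p => pvLetters.contains (pvFirst p.1))) = true
instance (my_dict : List (String × Int)) : Decidable (Pre_segmentate my_dict) := by
  unfold Pre_segmentate; infer_instance

def pvWitness_segmentate : (List (String × Int)) := [("apple", 1), ("art", 2), ("bat", 3)]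

def Spec_segmentate (my_dict : List (String × Int)) (out : List (String × List (String × Int))) : Prop := out = segmentate_alt my_dict
instance (my_dict : List (String × Int)) (out : List (String × List (String × Int))) : Decidable (Spec_segmentate my_dict out) := by unfold Spec_segmentate; infer_instance

-- ===== CLAIM (what is proved, stated in full; the proofs are below) =====
def Claim_equal_segmentate : Prop := ∀ (my_dict : List (String × Int)), Dom_segmentate my_dict → Pre_segmentate my_dict → Spec_segmentate my_dict (segmentate my_dict)

-- ===== LEMMAS AND PROOFS =====

-- a fold inserting the constant value v never changes a getD-with-default-v
theorem pv_getD_foldl_insert_const {ν : Type} (l : List String) (v : ν)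
    (d : PySem.Dict String ν) (c : String) (h : d.getD c v = v) :
    (l.foldl (fun d x => d.insert x v) d).getD c v = v := by
  induction l generalizing d with
  | nil => simpa using h
  | cons x t ih =>
    simp only [List.foldl_cons]
    exact ih _ (by rw [PySem.Dict.getD_insert]; split <;> simp [h])

-- getD of a keyed modify-fold: only the entries whose key maps to c act, in order
theorem pv_getD_foldl_modify_key {β ν : Type} (l : List β) (key : β → String) (e : ν)
    (f : β → ν → ν) (d : PySem.Dict String ν) (c : String) :
    (l.foldl (fun d p => d.modify (key p) e (fun b => f p b)) d).getD c e
      = (l.filter (fun p => key p == c)).foldl (fun b p => f p b) (d.getD c e) := by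
  induction l generalizing d with
  | nil => simp
  | cons x t ih =>
    simp only [List.foldl_cons, List.filter_cons]
    rw [ih]
    by_cases hx : key x = c
    · simp [hx]
    · have hb : (key x == c) = false := by simpa using hx
      rw [if_neg (by simp [hb]), PySem.Dict.getD_modify, if_neg (fun hc => hx hc.symm)]

-- the value-rewriting fold 'for k in d: d[k] = g(d[k])' over a duplicate-free key list
theorem pv_getD_foldl_update_values {ν : Type} (l : List String) (g : ν → ν) (e : ν)
    (d : PySem.Dict String ν) (c : String) (hnd : l.Nodup) :
    (l.foldl (fun d k => d.insert k (g (d.getD k e))) d).getD c e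
      = if c ∈ l then g (d.getD c e) else d.getD c e := by
  induction l generalizing d with
  | nil => simp
  | cons x t ih =>
    simp only [List.foldl_cons, List.mem_cons]
    rw [ih _ hnd.of_cons]
    by_cases hc : c = x
    · subst hc
      have : c ∉ t := (List.nodup_cons.mp hnd).1
      simp [this]
    · by_cases hct : c ∈ t <;> simp [hc, hct, PySem.Dict.getD_insert]

-- stable insertion commutes with a decoration map
theorem pv_insertBy_map {α β : Type} (bf : α → α → Bool) (g : α → β) (bf' : β → β → Bool)
    (hbf : ∀ a b, bf' (g a) (g b) = bf a b) (x : α) (ys : List α) :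
    PySem.List.insertBy bf' (g x) (ys.map g) = (PySem.List.insertBy bf x ys).map g := by
  induction ys with
  | nil => simp [PySem.List.insertBy]
  | cons y t ih =>
    simp only [List.map_cons, PySem.List.insertBy, hbf]
    split <;> simp_all

theorem pv_foldl_insertBy_map {α β : Type} (bf : α → α → Bool) (g : α → β) (bf' : β → β → Bool)
    (hbf : ∀ a b, bf' (g a) (g b) = bf a b) (xs acc : List α) :
    (xs.map g).foldl (fun acc x => PySem.List.insertBy bf' x acc) (acc.map g)
      = (xs.foldl (fun acc x => PySem.List.insertBy bf x acc) acc).map g := by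
  induction xs generalizing acc with
  | nil => simp
  | cons x t ih =>
    simp only [List.map_cons, List.foldl_cons]
    rw [pv_insertBy_map bf g bf' hbf x acc, ih]

-- sorted(xs.map g, key) = (sorted xs (key∘g)).map g — sorting a decorated list sorts the originals
theorem pv_sorted_map {α β κ : Type} [LT κ] [DecidableLT κ] (g : α → β) (key : β → κ)
    (rev : Bool) (xs : List α) :
    PySem.List.sorted (xs.map g) key rev = (PySem.List.sorted xs (fun a => key (g a)) rev).map g := by
  cases rev
  · rw [PySem.List.sorted_eq_foldl_insertBy, PySem.List.sorted_eq_foldl_insertBy]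
    exact pv_foldl_insertBy_map _ g _ (fun a b => rfl) xs []
  · rw [PySem.List.sorted_rev_eq_foldl_insertBy, PySem.List.sorted_rev_eq_foldl_insertBy]
    exact pv_foldl_insertBy_map _ g _ (fun a b => rfl) xs []

-- Set.update adds nothing when every new element is already present
theorem pv_set_update_of_subset (s : PySem.Set String) (xs : List String)
    (h : ∀ x ∈ xs, x ∈ s) : PySem.Set.update s xs = s := by
  rw [PySem.Set.update_eq_append_filter]
  have hnil : List.filter (fun y => !s.contains y) (PySem.Set.ofList xs) = [] := by
    rw [List.filter_eq_nil_iff]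
    intro y hy
    rw [PySem.Set.mem_ofList] at hy
    simp [PySem.Set.contains_eq_listContains, h y hy]
  rw [hnil, List.append_nil]

theorem pv_letters_nodup : pvLetters.Nodup := by decide


-- ---- common normal form of both ports ----
def pvMd (l : List (String × Int)) : PySem.Dict String Int := PySem.Dict.ofList l

def pvBucket (l : List (String × Int)) (c : String) : PySem.Dict String Int :=
  ((pvMd l).items.filter (fun p => pvFirst p.1 == c)).foldl
    (fun b p => b.insert p.1 p.2) PySem.Dict.empty

def pvCnt (l : List (String × Int)) (c : String) : Int :=
  ((pvMd l).items.countP (fun p => pvFirst p.1 == c) : Int)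

def pvOrder (l : List (String × Int)) : List String := PySem.List.sorted pvLetters (pvCnt l) true

def pvNF (l : List (String × Int)) : List (String × List (String × Int)) :=
  (pvOrder l).map (fun c =>
    (c, PySem.List.sorted (pvBucket l c).items (fun kv => kv.1) false))

theorem pv_bucket_items (l : List (String × Int)) (c : String) :
    (pvBucket l c).items = (pvMd l).items.filter (fun p => pvFirst p.1 == c) := by
  unfold pvBucket
  rw [PySem.Dict.items_foldl_insert_fresh
        (k := fun (p : String × Int) => p.1) (v := fun (p : String × Int) => p.2)
        (l := (pvMd l).items.filter (fun p => pvFirst p.1 == c)) (d := PySem.Dict.empty)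
        (fun a _ => PySem.Dict.contains_empty _)
        ((List.filter_sublist.map _).nodup
          (by simpa [PySem.Dict.keys] using PySem.Dict.nodup_keys_ofList (κ := String) (ν := Int) l))]
  simp [PySem.Dict.empty]

theorem pv_bucket_keys_nodup (l : List (String × Int)) (c : String) :
    (pvBucket l c).keys.Nodup := by
  unfold pvBucket
  exact PySem.Dict.nodup_keys_foldl_insert_key _ _ _ _ (by simp [PySem.Dict.keys, PySem.Dict.empty])

-- ---- B-side lemmas: first letters, runs of the globally sorted list ----

-- pvFirst reads only the head character
theorem pv_first_eq (s : String) : pvFirst s = (match s.toList with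
  | [] => ""
  | a :: _ => String.ofList [a]) := by
  unfold pvFirst
  cases h : s.toList with
  | nil => simp [PySem.Str.pyGet?, h, PySem.List.pyGet?, PySem.List.pyIdx?]
  | cons a t => simp [PySem.Str.pyGet?, h, PySem.List.pyGet?, PySem.List.pyIdx?]

-- the first letter is monotone in the string order
theorem pv_first_mono {s t : String} (h : s ≤ t) : pvFirst s ≤ pvFirst t := by
  rw [← not_lt]
  intro hlt
  apply not_lt.mpr h
  rw [pv_first_eq s, pv_first_eq t] at hlt
  cases hs : s.toList with
  | nil =>
    exfalso
    rw [hs] at hlt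
    cases ht : t.toList with
    | nil =>
      rw [ht] at hlt
      exact lt_irrefl _ hlt
    | cons b bs =>
      rw [ht] at hlt
      have h' : List.Lex (· < ·) ([b] : List Char) ([] : List Char) := by
        have h2 := String.lt_iff_toList_lt.mp hlt
        simpa using h2
      cases h'
  | cons a as =>
    rw [hs] at hlt
    cases ht : t.toList with
    | nil =>
      rw [String.lt_iff_toList_lt, ht, hs]
      exact (List.Lex.nil : List.Lex (· < ·) [] (a :: as))
    | cons b bs =>
      rw [ht] at hlt
      have h1 : ([b] : List Char) < [a] := by
        have h2 := String.lt_iff_toList_lt.mp hlt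
        simpa using h2
      have h' : List.Lex (· < ·) [b] [a] := h1
      have hba : b < a := by
        cases h' with
        | cons h2 => cases h2
        | rel h2 => exact h2
      rw [String.lt_iff_toList_lt, ht, hs]
      exact (List.Lex.rel hba : List.Lex (· < ·) (b :: bs) (a :: as))

-- the key-sorted item list has nondecreasing first letters
theorem pv_sorted_first_mono (L : List (String × Int)) :
    (PySem.List.sorted L (fun kv => kv.1) false).Pairwise (fun a b => pvFirst a.1 ≤ pvFirst b.1) := by
  have h1 : (PySem.List.sorted L (fun kv => kv.1) false).Pairwise (fun a b => (a.1 : String) ≤ b.1) :=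
    PySem.List.sorted_pairwise L (fun kv => kv.1)
  exact h1.imp (fun h => pv_first_mono h)

-- set(xs) keeps a subsequence of xs
theorem pv_ofList_sublist {α : Type} [BEq α] (l : List α) : (PySem.Set.ofList l).Sublist l := by
  induction l using List.reverseRecOn with
  | nil => simp [PySem.Set.ofList_eq_foldl]
  | append_singleton xs a ih =>
    rw [PySem.Set.ofList_eq_foldl, List.foldl_append]
    simp only [List.foldl_cons, List.foldl_nil, ← PySem.Set.ofList_eq_foldl]
    unfold PySem.Set.add
    split
    · exact ih.trans (List.sublist_append_left _ _)
    · exact List.Sublist.append ih (List.Sublist.refl _)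

theorem pv_ofList_concat {α : Type} [BEq α] [LawfulBEq α] (l : List α) (a : α) :
    PySem.Set.ofList (l ++ [a])
      = if a ∈ l then PySem.Set.ofList l else PySem.Set.ofList l ++ [a] := by
  rw [PySem.Set.ofList_eq_foldl, List.foldl_append]
  simp only [List.foldl_cons, List.foldl_nil, ← PySem.Set.ofList_eq_foldl]
  unfold PySem.Set.add
  by_cases h : a ∈ l
  · rw [if_pos h, if_pos]
    rw [PySem.Set.contains_eq_listContains]
    exact List.contains_iff_mem.mpr ((PySem.Set.mem_ofList l a).mpr h)
  · rw [if_neg h, if_neg]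
    rw [PySem.Set.contains_eq_listContains]
    simp [PySem.Set.mem_ofList, h]

-- in a nondecreasing duplicate-free list the maximum sits at the end
theorem pv_getLast_of_max {α : Type} [LinearOrder α] (l : List α) (a : α)
    (hp : l.Pairwise (· ≤ ·)) (hn : l.Nodup) (ha : a ∈ l) (hmax : ∀ y ∈ l, y ≤ a) :
    l.getLast? = some a := by
  induction l with
  | nil => cases ha
  | cons x t ih =>
    cases t with
    | nil =>
      have : a = x := by simpa using ha
      simp [this]
    | cons y ts =>
      have hat : a ∈ y :: ts := by
        rcases List.mem_cons.mp ha with rfl | h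
        · exfalso
          have hya : y ≤ a := hmax y (by simp)
          have hay : a ≤ y := (List.pairwise_cons.mp hp).1 y (by simp)
          have : y = a := le_antisymm hya hay
          exact (List.nodup_cons.mp hn).1 (this ▸ (by simp : y ∈ y :: ts))
        · exact h
      rw [List.getLast?_cons_cons]
      exact ih hp.of_cons hn.of_cons hat (fun z hz => hmax z (List.mem_cons_of_mem _ hz))

-- association-list facts about PySem.Dict.ofList
theorem pv_dict_items_ofList {ν : Type} (L : List (String × ν))
    (h : (L.map Prod.fst).Nodup) : (PySem.Dict.ofList L).items = L := by
  have hf := PySem.Dict.items_foldl_insert_fresh L Prod.fst Prod.snd PySem.Dict.empty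
    (fun a _ => PySem.Dict.contains_empty _) h
  simpa [PySem.Dict.empty] using hf

theorem pv_getD_foldl_insert_pairs {ν : Type} (L : List (String × ν)) (c : String) (e : ν) :
    ∀ d : PySem.Dict String ν, c ∉ L.map Prod.fst →
      (L.foldl (fun d p => d.insert p.1 p.2) d).getD c e = d.getD c e := by
  induction L with
  | nil => intro d _; rfl
  | cons p t iht =>
    intro d hc
    simp only [List.map_cons, List.mem_cons, not_or] at hc
    rw [List.foldl_cons, iht (d.insert p.1 p.2) hc.2, PySem.Dict.getD_insert, if_neg hc.1]

theorem pv_dict_getD_ofList_not_mem {ν : Type} (L : List (String × ν)) (c : String) (e : ν)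
    (h : c ∉ L.map Prod.fst) : (PySem.Dict.ofList L).getD c e = e := by
  rw [show (PySem.Dict.ofList L : PySem.Dict String ν)
      = L.foldl (fun d p => d.insert p.1 p.2) PySem.Dict.empty from rfl,
    pv_getD_foldl_insert_pairs L c e PySem.Dict.empty h]
  exact PySem.Dict.getD_empty c e

-- how the run step acts on the shapes the scan produces
theorem pv_runStep_concat (rs : List (String × List (String × Int))) (c : String)
    (run : List (String × Int)) (p : String × Int) :
    pvRunStep (rs ++ [(c, run)]) p =
      if c = pvFirst p.1 then rs ++ [(c, run ++ [p])]
      else (rs ++ [(c, run)]) ++ [(pvFirst p.1, [p])] := by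
  by_cases h : c = pvFirst p.1 <;>
    simp [pvRunStep, h]

-- the run scan of B over a list whose first letters are nondecreasing: one run per
-- distinct first letter, in first-occurrence order, each run the filtered sublist
theorem pv_runScan (xs : List (String × Int))
    (hmono : xs.Pairwise (fun a b => pvFirst a.1 ≤ pvFirst b.1)) :
    xs.foldl pvRunStep []
    = (PySem.List.dedup (xs.map (fun q => pvFirst q.1))).map
        (fun c => (c, xs.filter (fun q => pvFirst q.1 == c))) := by
  induction xs using List.reverseRecOn with
  | nil => simp [PySem.List.dedup_eq_ofList, PySem.Set.ofList_eq_foldl]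
  | append_singleton xs p ih =>
    have hm' : xs.Pairwise (fun a b => pvFirst a.1 ≤ pvFirst b.1) :=
      hmono.sublist (List.sublist_append_left xs [p])
    have hle : ∀ q ∈ xs, pvFirst q.1 ≤ pvFirst p.1 := by
      intro q hq
      exact (List.pairwise_append.mp hmono).2.2 q hq p (by simp)
    rw [List.foldl_append, ih hm', List.foldl_cons, List.foldl_nil, List.map_append]
    simp only [List.map_cons, List.map_nil]
    by_cases hmem : pvFirst p.1 ∈ xs.map (fun q => pvFirst q.1)
    · -- the letter already has a run: it is the last one, extend it
      have hded : PySem.List.dedup (xs.map (fun q => pvFirst q.1) ++ [pvFirst p.1])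
          = PySem.List.dedup (xs.map (fun q => pvFirst q.1)) := by
        rw [PySem.List.dedup_eq_ofList, PySem.List.dedup_eq_ofList, pv_ofList_concat,
          if_pos hmem]
      rw [hded]
      have hpl : (xs.map (fun q => pvFirst q.1)).Pairwise (· ≤ ·) := by
        rw [List.pairwise_map]
        exact hm'
      have hdl : (PySem.List.dedup (xs.map (fun q => pvFirst q.1))).Pairwise (· ≤ ·) :=
        hpl.sublist (by rw [PySem.List.dedup_eq_ofList]; exact pv_ofList_sublist _)
      have hdn : (PySem.List.dedup (xs.map (fun q => pvFirst q.1))).Nodup := by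
        rw [PySem.List.dedup_eq_ofList]; exact PySem.Set.nodup_ofList _
      have hdm : pvFirst p.1 ∈ PySem.List.dedup (xs.map (fun q => pvFirst q.1)) := by
        rw [PySem.List.dedup_eq_ofList, PySem.Set.mem_ofList]; exact hmem
      have hdmax : ∀ y ∈ PySem.List.dedup (xs.map (fun q => pvFirst q.1)), y ≤ pvFirst p.1 := by
        intro y hy
        rw [PySem.List.dedup_eq_ofList, PySem.Set.mem_ofList] at hy
        obtain ⟨q, hq, rfl⟩ := List.mem_map.mp hy
        exact hle q hq
      have hlast := pv_getLast_of_max _ _ hdl hdn hdm hdmax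
      obtain ⟨front, hfr⟩ := List.getLast?_eq_some_iff.mp hlast
      have hcnf : pvFirst p.1 ∉ front := by
        have hnd2 := hfr ▸ hdn
        exact fun hc => (List.disjoint_of_nodup_append hnd2) hc (by simp)
      rw [hfr, List.map_append, List.map_append]
      simp only [List.map_cons, List.map_nil]
      rw [pv_runStep_concat, if_pos rfl]
      have hfront : front.map (fun c => (c, xs.filter (fun q => pvFirst q.1 == c)))
          = front.map (fun c => (c, (xs ++ [p]).filter (fun q => pvFirst q.1 == c))) := by
        refine List.map_congr_left (fun c hc => ?_)
        have hne : (pvFirst p.1 == c) = false := by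
          simp only [beq_eq_false_iff_ne, ne_eq]
          exact fun h => hcnf (h ▸ hc)
        rw [List.filter_append]
        simp [hne]
      rw [hfront]
      have hlastrun : xs.filter (fun q => pvFirst q.1 == pvFirst p.1) ++ [p]
          = (xs ++ [p]).filter (fun q => pvFirst q.1 == pvFirst p.1) := by
        rw [List.filter_append]
        simp
      rw [hlastrun]
    · -- a fresh letter: open a new run at the end
      have hded : PySem.List.dedup (xs.map (fun q => pvFirst q.1) ++ [pvFirst p.1])
          = PySem.List.dedup (xs.map (fun q => pvFirst q.1)) ++ [pvFirst p.1] := by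
        rw [PySem.List.dedup_eq_ofList, PySem.List.dedup_eq_ofList, pv_ofList_concat,
          if_neg hmem]
      rw [hded, List.map_append]
      simp only [List.map_cons, List.map_nil]
      have hfresh : ∀ c ∈ PySem.List.dedup (xs.map (fun q => pvFirst q.1)),
          (pvFirst p.1 == c) = false := by
        intro c hc
        rw [PySem.List.dedup_eq_ofList, PySem.Set.mem_ofList] at hc
        simp only [beq_eq_false_iff_ne, ne_eq]
        exact fun h => hmem (h ▸ hc)
      have hcongr : (PySem.List.dedup (xs.map (fun q => pvFirst q.1))).map
            (fun c => (c, (xs ++ [p]).filter (fun q => pvFirst q.1 == c)))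
          = (PySem.List.dedup (xs.map (fun q => pvFirst q.1))).map
            (fun c => (c, xs.filter (fun q => pvFirst q.1 == c))) := by
        refine List.map_congr_left (fun c hc => ?_)
        rw [List.filter_append]
        simp [hfresh c hc]
      have hnew : (xs ++ [p]).filter (fun q => pvFirst q.1 == pvFirst p.1) = [p] := by
        rw [List.filter_append, List.filter_eq_nil_iff.mpr, List.nil_append]
        · simp
        · intro q hq
          simp only [beq_iff_eq]
          exact fun h => hmem (List.mem_map.mpr ⟨q, hq, h⟩)
      rw [hcongr, hnew]
      cases hD : PySem.List.dedup (xs.map (fun q => pvFirst q.1)) using List.reverseRecOn with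
      | nil => rfl
      | append_singleton front c0 =>
        have hc0 : c0 ∈ PySem.List.dedup (xs.map (fun q => pvFirst q.1)) := by
          rw [hD]; simp
        have hne : c0 ≠ pvFirst p.1 := by
          have hf := hfresh c0 hc0
          simp only [beq_eq_false_iff_ne, ne_eq] at hf
          exact fun h => hf h.symm
        rw [List.map_append]
        simp only [List.map_cons, List.map_nil]
        rw [pv_runStep_concat, if_neg hne]

set_option maxHeartbeats 1000000 in
theorem pv_alt_eq (l : List (String × Int)) : segmentate_alt l = pvNF l := by
  simp only [segmentate_alt]
  rw [show PySem.Dict.ofList l = pvMd l from rfl]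
  have hkeysnd : ((pvMd l).items.map Prod.fst).Nodup := PySem.Dict.nodup_keys_ofList l
  have hperm : (PySem.List.sorted (pvMd l).items (fun kv => kv.1) false).Perm (pvMd l).items :=
    PySem.List.sorted_perm _ _ _
  have hsortnd : ((PySem.List.sorted (pvMd l).items (fun kv => kv.1) false).map Prod.fst).Nodup :=
    (hperm.map Prod.fst).nodup_iff.mpr hkeysnd
  have hmono := pv_sorted_first_mono (pvMd l).items
  have hple : (PySem.List.sorted (pvMd l).items (fun kv => kv.1) false).Pairwise
      (fun a b => (a.1 : String) ≤ b.1) :=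
    PySem.List.sorted_pairwise (pvMd l).items (fun kv => kv.1)
  rw [pv_runScan _ hmono]
  set its := PySem.List.sorted (pvMd l).items (fun kv => kv.1) false with hits
  set D := PySem.List.dedup (its.map (fun q => pvFirst q.1)) with hDdef
  have hDn : D.Nodup := by
    rw [hDdef, PySem.List.dedup_eq_ofList]; exact PySem.Set.nodup_ofList _
  set runs := D.map (fun c => (c, its.filter (fun q => pvFirst q.1 == c))) with hruns
  have hrunsnd : (runs.map Prod.fst).Nodup := by
    rw [hruns, List.map_map]
    rw [show (Prod.fst ∘ fun c => (c, its.filter (fun q => pvFirst q.1 == c)))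
        = fun c : String => c from rfl, List.map_id']
    exact hDn
  have hitems : (PySem.Dict.ofList runs).items = runs := pv_dict_items_ofList runs hrunsnd
  have hkeys : (PySem.Dict.ofList runs).keys.Nodup := by
    show ((PySem.Dict.ofList runs).items.map Prod.fst).Nodup
    rw [hitems]; exact hrunsnd
  -- the per-letter lookup in the run dict is the filtered slice of the sorted items
  have hgetD : ∀ c : String, (PySem.Dict.ofList runs).getD c []
      = if c ∈ D then its.filter (fun q => pvFirst q.1 == c) else [] := by
    intro c
    by_cases hc : c ∈ D
    · rw [if_pos hc]
      exact PySem.Dict.getD_of_mem_items _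
        (by rw [hitems, hruns]; exact List.mem_map_of_mem hc) hkeys []
    · rw [if_neg hc]
      refine pv_dict_getD_ofList_not_mem runs c [] ?_
      rw [hruns, List.map_map]
      simpa using hc
  -- the length of each lookup is the letter's frequency
  have hmemD : ∀ c : String, c ∈ D ↔ c ∈ its.map (fun q => pvFirst q.1) := by
    intro c
    rw [hDdef, PySem.List.dedup_eq_ofList, PySem.Set.mem_ofList]
  have hfilter_nil : ∀ c : String, c ∉ D → (pvMd l).items.filter (fun q => pvFirst q.1 == c) = [] := by
    intro c hc
    rw [List.filter_eq_nil_iff]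
    intro q hq
    simp only [beq_iff_eq]
    intro h
    exact hc ((hmemD c).mpr (List.mem_map.mpr ⟨q, (hperm.mem_iff).mpr hq, h⟩))
  have hlen : ∀ c : String, (((PySem.Dict.ofList runs).getD c []).length : Int) = pvCnt l c := by
    intro c
    rw [hgetD c]
    by_cases hc : c ∈ D
    · rw [if_pos hc, ← List.countP_eq_length_filter, pvCnt,
        hperm.countP_eq (fun q => pvFirst q.1 == c)]
    · rw [if_neg hc, pvCnt, List.countP_eq_length_filter, hfilter_nil c hc]
  -- the letter ordering: ascending -count is descending count with alphabetical ties
  have hkeyfun : (fun c => -(((PySem.Dict.ofList runs).getD c []).length : Int))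
      = fun c => -(pvCnt l c) := by
    funext c; rw [hlen c]
  rw [hkeyfun]
  have horder : PySem.List.sorted pvLetters (fun c => -(pvCnt l c)) false = pvOrder l := by
    rw [pvOrder, PySem.List.sorted_eq_foldl_insertBy, PySem.List.sorted_rev_eq_foldl_insertBy]
    have hbf : (fun (a b : String) => decide (-(pvCnt l a) < -(pvCnt l b)))
        = fun (a b : String) => decide (pvCnt l b < pvCnt l a) := by
      funext a b
      simp [neg_lt_neg_iff]
    rw [hbf]
  rw [horder]
  -- each run, re-read as a dict, is the key-sorted bucket
  unfold pvNF
  refine List.map_congr_left (fun c _ => ?_)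
  refine congrArg (fun v => (c, v)) ?_
  rw [hgetD c]
  by_cases hc : c ∈ D
  · rw [if_pos hc]
    have hL : ((its.filter (fun q => pvFirst q.1 == c)).map Prod.fst).Nodup :=
      ((List.filter_sublist (l := its)).map Prod.fst).nodup hsortnd
    rw [pv_dict_items_ofList _ hL]
    refine (PySem.List.sorted_eq_of_perm_of_pairwise_lt _ _ _ ?_ ?_).symm
    · rw [pv_bucket_items]
      exact hperm.filter _
    · have hpl : its.Pairwise (fun a b => a.1 < b.1) := by
        have h2 : its.Pairwise (fun a b => a.1 ≠ b.1) := List.pairwise_map.mp hsortnd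
        exact (hple.and h2).imp (fun h => lt_of_le_of_ne h.1 h.2)
      exact hpl.filter _
  · rw [if_neg hc]
    have : (pvBucket l c).items = [] := by
      rw [pv_bucket_items]
      exact hfilter_nil c hc
    rw [show (PySem.Dict.ofList ([] : List (String × Int))).items = [] from rfl,
      (PySem.List.sorted_eq_nil_iff _ _ _).mpr this]

theorem pv_md_keys (l : List (String × Int)) :
    (pvMd l).keys = PySem.Set.ofList (l.map Prod.fst) := by
  have h := PySem.Dict.keys_foldl_insert_key (ν := Int) l Prod.fst (fun _ p => p.2) PySem.Dict.empty
  rw [PySem.Dict.keys_empty, PySem.Set.update_nil_left] at h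
  exact h

theorem pv_pre_first (l : List (String × Int)) (hpre : Pre_segmentate l) :
    ∀ k ∈ (pvMd l).keys, pvFirst k ∈ pvLetters := by
  intro k hk
  rw [pv_md_keys, PySem.Set.mem_ofList] at hk
  obtain ⟨p, hp, rfl⟩ := List.mem_map.mp hk
  have h := List.all_eq_true.mp hpre p hp
  exact List.contains_iff_mem.mp (by simpa using h)

theorem pv_foldl_add_one {α : Type} (t : List α) (a : Int) :
    t.foldl (fun b _ => b + 1) a = a + t.length := by
  induction t generalizing a with
  | nil => simp
  | cons x r ih => simp [ih]; omega

-- A's per-letter bucket fold over keys equals B's fold over items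
theorem pv_bucketA (l : List (String × Int)) (c : String) :
    ((pvMd l).keys.filter (fun k => pvFirst k == c)).foldl
      (fun b k => b.insert k ((pvMd l).getD k 0)) PySem.Dict.empty = pvBucket l c := by
  unfold pvBucket
  rw [show (pvMd l).keys = (pvMd l).items.map Prod.fst from rfl, List.filter_map, List.foldl_map]
  exact PySem.List.foldl_congr_mem _ _ _ _ (by
    intro acc x hx
    have hxi : x ∈ (pvMd l).items := (List.mem_filter.mp hx).1
    have : (pvMd l).getD x.1 0 = x.2 :=
      PySem.Dict.getD_of_mem_items _ (by simpa using hxi) (PySem.Dict.nodup_keys_ofList l) 0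
    simp [this])

theorem pv_sortByKeys_items (b : PySem.Dict String Int) (h : b.keys.Nodup) :
    (sortByKeys b false).items = PySem.List.sorted b.items (fun kv => kv.1) false := by
  rw [PySem.Dict.items_eq_map_keys b h 0]
  rw [pv_sorted_map (g := fun k => (k, b.getD k 0)) (key := fun kv => kv.1)]
  unfold sortByKeys
  rw [PySem.Dict.items_foldl_insert_fresh (k := fun (x : String) => x) (v := fun x => b.getD x 0)
        (l := PySem.List.sorted b.keys (fun k => k) false) (d := PySem.Dict.empty)
        (fun a _ => PySem.Dict.contains_empty _)
        (by simpa using (PySem.List.sorted_perm b.keys (fun k => k) false).symm.nodup h)]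
  simp [PySem.Dict.empty]

theorem pv_a_eq (l : List (String × Int)) (hpre : Pre_segmentate l) :
    segmentate l = pvNF l := by
  simp only [segmentate, sortByValues]
  rw [show PySem.Dict.ofList l = pvMd l from rfl]
  have hsub : ∀ x ∈ (pvMd l).keys.map pvFirst, x ∈ pvLetters := by
    intro x hx
    obtain ⟨k, hk, rfl⟩ := List.mem_map.mp hx
    exact pv_pre_first l hpre k hk
  -- the frequency dict: its keys stay the 26 letters, its values become the counts
  have hseg0keys :
      (List.foldl (fun d letter => d.insert letter (0 : Int)) PySem.Dict.empty pvLetters).keys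
        = pvLetters := by
    simp only [PySem.Dict.keys_foldl_insert]
    rw [PySem.Dict.keys_empty, PySem.Set.update_nil_left]
    exact PySem.Set.ofList_eq_self_of_nodup _ pv_letters_nodup
  have hseg1keys :
      (List.foldl (fun d key => d.modify (pvFirst key) 0 fun x => x + 1)
        (List.foldl (fun d letter => d.insert letter (0 : Int)) PySem.Dict.empty pvLetters)
        (pvMd l).keys).keys = pvLetters := by
    simp only [PySem.Dict.keys_foldl_modify_key]
    rw [hseg0keys]
    exact pv_set_update_of_subset _ _ hsub
  have hseg1nodup :
      (List.foldl (fun d key => d.modify (pvFirst key) 0 fun x => x + 1)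
        (List.foldl (fun d letter => d.insert letter (0 : Int)) PySem.Dict.empty pvLetters)
        (pvMd l).keys).keys.Nodup := by
    rw [hseg1keys]; exact pv_letters_nodup
  have hseg1items :
      (List.foldl (fun d key => d.modify (pvFirst key) 0 fun x => x + 1)
        (List.foldl (fun d letter => d.insert letter (0 : Int)) PySem.Dict.empty pvLetters)
        (pvMd l).keys).items = pvLetters.map (fun c => (c, pvCnt l c)) := by
    rw [PySem.Dict.items_eq_map_keys _ hseg1nodup 0, hseg1keys]
    refine List.map_congr_left (fun c _ => ?_)
    refine congrArg (fun v => (c, v)) ?_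
    simp only [pv_getD_foldl_modify_key]
    rw [pv_getD_foldl_insert_const pvLetters (0 : Int) PySem.Dict.empty c
      (PySem.Dict.getD_empty c 0)]
    rw [pv_foldl_add_one, zero_add, ← List.countP_eq_length_filter,
      show (pvMd l).keys = (pvMd l).items.map Prod.fst from rfl, List.countP_map]
    rfl
  rw [hseg1items, pv_sorted_map (g := fun c => (c, pvCnt l c)) (key := fun i => i.2)]
  have hordkeys :
      (List.foldl (fun acc elem => acc.insert elem.1 elem.2) PySem.Dict.empty
        ((PySem.List.sorted pvLetters (fun a => pvCnt l a) true).map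
          (fun c => (c, pvCnt l c)))).keys
        = pvOrder l := by
    simp only [PySem.Dict.keys_foldl_insert_key (key := Prod.fst) (f := fun _ e => e.2)]
    rw [PySem.Dict.keys_empty, PySem.Set.update_nil_left, List.map_map]
    have hmapid : (Prod.fst ∘ fun c => (c, pvCnt l c)) = fun (c : String) => c := rfl
    rw [hmapid, List.map_id']
    exact PySem.Set.ofList_eq_self_of_nodup _
      ((PySem.List.sorted_perm pvLetters (pvCnt l) true).symm.nodup pv_letters_nodup)
  rw [hordkeys]
  have hordnodup : (pvOrder l).Nodup :=
    (PySem.List.sorted_perm pvLetters (pvCnt l) true).symm.nodup pv_letters_nodup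
  have hsubord : ∀ x ∈ (pvMd l).keys.map pvFirst, x ∈ pvOrder l := fun x hx =>
    (PySem.List.mem_sorted pvLetters (pvCnt l) true x).mpr (hsub x hx)
  have hnew0keys :
      (List.foldl (fun d letter => d.insert letter (PySem.Dict.empty : PySem.Dict String Int))
        PySem.Dict.empty (pvOrder l)).keys = pvOrder l := by
    simp only [PySem.Dict.keys_foldl_insert]
    rw [PySem.Dict.keys_empty, PySem.Set.update_nil_left]
    exact PySem.Set.ofList_eq_self_of_nodup _ hordnodup
  have hnew1keys :
      (List.foldl
        (fun d key => d.modify (pvFirst key) PySem.Dict.empty fun b => b.insert key ((pvMd l).getD key 0))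
        (List.foldl (fun d letter => d.insert letter PySem.Dict.empty) PySem.Dict.empty (pvOrder l))
        (pvMd l).keys).keys = pvOrder l := by
    simp only [PySem.Dict.keys_foldl_modify_key]
    rw [hnew0keys]
    exact pv_set_update_of_subset _ _ hsubord
  have hnew1getD : ∀ c,
      (List.foldl
        (fun d key => d.modify (pvFirst key) PySem.Dict.empty fun b => b.insert key ((pvMd l).getD key 0))
        (List.foldl (fun d letter => d.insert letter PySem.Dict.empty) PySem.Dict.empty (pvOrder l))
        (pvMd l).keys).getD c PySem.Dict.empty = pvBucket l c := by
    intro c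
    simp only [pv_getD_foldl_modify_key]
    rw [pv_getD_foldl_insert_const (pvOrder l) PySem.Dict.empty PySem.Dict.empty c
      (PySem.Dict.getD_empty c PySem.Dict.empty)]
    exact pv_bucketA l c
  rw [hnew1keys]
  have hnew2keys :
      (List.foldl (fun d key => d.insert key (sortByKeys (d.getD key PySem.Dict.empty) false))
        (List.foldl
          (fun d key => d.modify (pvFirst key) PySem.Dict.empty fun b => b.insert key ((pvMd l).getD key 0))
          (List.foldl (fun d letter => d.insert letter PySem.Dict.empty) PySem.Dict.empty (pvOrder l))
          (pvMd l).keys)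
        (pvOrder l)).keys = pvOrder l := by
    simp only [PySem.Dict.keys_foldl_insert]
    rw [hnew1keys]
    exact pv_set_update_of_subset _ _ (fun x hx => hx)
  have hnew2nodup :
      (List.foldl (fun d key => d.insert key (sortByKeys (d.getD key PySem.Dict.empty) false))
        (List.foldl
          (fun d key => d.modify (pvFirst key) PySem.Dict.empty fun b => b.insert key ((pvMd l).getD key 0))
          (List.foldl (fun d letter => d.insert letter PySem.Dict.empty) PySem.Dict.empty (pvOrder l))
          (pvMd l).keys)
        (pvOrder l)).keys.Nodup := by
    rw [hnew2keys]; exact hordnodup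
  rw [PySem.Dict.items_eq_map_keys _ hnew2nodup PySem.Dict.empty, hnew2keys, List.map_map]
  unfold pvNF
  refine List.map_congr_left (fun c hc => ?_)
  have hc' : c ∈ pvOrder l := hc
  simp only [Function.comp]
  rw [pv_getD_foldl_update_values (pvOrder l) (fun b => sortByKeys b false) PySem.Dict.empty
    (List.foldl
      (fun d key => d.modify (pvFirst key) PySem.Dict.empty fun b => b.insert key ((pvMd l).getD key 0))
      (List.foldl (fun d letter => d.insert letter PySem.Dict.empty) PySem.Dict.empty (pvOrder l))
      (pvMd l).keys) c hordnodup]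
  rw [if_pos hc', hnew1getD, pv_sortByKeys_items _ (pv_bucket_keys_nodup l c)]

-- ===== VERDICT (by name: the statement is the Claim_ definition above) =====
theorem segmentate_spec : Claim_equal_segmentate := by
  intro l _hdom hpre
  unfold Spec_segmentate
  rw [pv_a_eq l hpre, pv_alt_eq l]
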